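-- pv_equiv track=rewrite | github.com/DominikEndrych/Parallel-Algorithms | TSP/TSP.py | perms_prefix
-- ===== SOURCE A (Python) =====
-- import itertools as it        # req. step 2
--
-- def perms_prefix(n, s):
--     numbers_to_permutate = [*range(n)]
--     numbers_to_permutate.remove(s)
--     permutations = []
--     for permutation in it.permutations(numbers_to_permutate):
--         p = list(permutation)
--         p.insert(0, s)
--         permutations.append(p)
--
--     return permutations
-- ===== SOURCE B (Python) =====
-- def perms_prefix(n, s):
--     rest = list(range(n))
--     rest.remove(s)
--     out = []
--
--     def go(prefix, remaining):
--         if not remaining: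
--             out.append(prefix)
--         else:
--             for i in range(len(remaining)):
--                 go(prefix + [remaining[i]], remaining[:i] + remaining[i + 1:])
--
--     go([s], rest)
--     return out
-- ===== Notes on version B (the rewrite author's own statement) =====
-- stated objective: alternative
-- what changed: Replaces the itertools.permutations call plus append/insert loop by a self-contained recursive backtracking generator that selects each remaining element in list order and carries the growing prefix (starting from [s]), emitting finished permutations directly; Pre_ excludes inputs with s outside range(n), where both raise ValueError from list.remove.
import Mathlib
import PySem

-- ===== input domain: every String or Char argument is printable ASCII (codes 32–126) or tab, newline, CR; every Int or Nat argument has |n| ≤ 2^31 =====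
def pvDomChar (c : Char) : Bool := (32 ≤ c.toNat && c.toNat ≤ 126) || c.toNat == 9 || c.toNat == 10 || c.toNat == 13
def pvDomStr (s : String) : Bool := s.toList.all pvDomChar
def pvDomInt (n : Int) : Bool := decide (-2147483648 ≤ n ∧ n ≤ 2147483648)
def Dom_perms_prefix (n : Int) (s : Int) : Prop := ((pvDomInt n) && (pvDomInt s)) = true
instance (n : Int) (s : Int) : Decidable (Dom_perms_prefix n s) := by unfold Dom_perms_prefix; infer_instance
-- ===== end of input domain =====

-- B replaces the itertools.permutations call + append/insert loop by a self-contained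
-- recursive backtracking generator carrying the growing prefix; alternative, no speed claim.

-- ===== PORT A =====
-- Hand port of itertools.permutations over a list (PySem has no primitive for it;
-- exact: for each index i in order, emit xs[i] prepended to each permutation of xs
-- with index i erased — itertools' emission order). fuel = xs.length at the call
-- only makes the recursion structural.
def pyPermutationsAux (fuel : Nat) (xs : List Int) : List (List Int) :=
  match fuel with
  | 0 => [[]]
  | fuel + 1 =>
    if xs = [] then [[]]
    else (List.range xs.length).flatMap
      (fun i => (pyPermutationsAux fuel (xs.eraseIdx i)).map (fun p => xs.getD i 0 :: p))

def pyPermutations (xs : List Int) : List (List Int) := pyPermutationsAux xs.length xs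

def perms_prefix (n : Int) (s : Int) : List (List Int) :=
  let numbers_to_permutate := PySem.List.pyRange 0 n 1
  match PySem.List.remove? numbers_to_permutate s with
  | none => []  -- list.remove raises ValueError here; excluded by Pre_
  | some numbers =>
    (pyPermutations numbers).foldl
      (fun permutations p => permutations ++ [PySem.List.insert p 0 s]) []

-- ===== PORT B =====
-- go(prefix, remaining): if remaining empty append prefix to out, else for i in
-- range(len(remaining)) recurse with prefix+[remaining[i]] and remaining[:i]+remaining[i+1:].
-- fuel (= recursion depth bound rest.length + 1 at the top call) only makes the
-- recursion structural.
def goB (fuel : Nat) (pre remaining : List Int) (out : List (List Int)) : List (List Int) :=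
  match fuel with
  | 0 => out
  | fuel + 1 =>
    if remaining = [] then out ++ [pre]
    else (PySem.List.pyRange 0 remaining.length 1).foldl
      (fun acc i => goB fuel (pre ++ [PySem.List.pyGetD remaining i 0])
          (PySem.List.slice remaining none (some i) ++ PySem.List.slice remaining (some (i + 1)) none) acc)
      out

def perms_prefix_alt (n : Int) (s : Int) : List (List Int) :=
  match PySem.List.remove? (PySem.List.pyRange 0 n 1) s with
  | none => []  -- list.remove raises ValueError here; excluded by Pre_
  | some rest => goB (rest.length + 1) [s] rest []

-- ===== PRECONDITION & SPEC =====
-- Pre_ excludes exactly the inputs with s ∉ range(n), on which A's list.remove raises ValueError.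
def Pre_perms_prefix (n : Int) (s : Int) : Prop := 0 ≤ s ∧ s < n
instance (n : Int) (s : Int) : Decidable (Pre_perms_prefix n s) := by unfold Pre_perms_prefix; infer_instance
def pvWitness_perms_prefix : Int × Int := (3, 1)

def Spec_perms_prefix (n : Int) (s : Int) (out : List (List Int)) : Prop := out = perms_prefix_alt n s
instance (n : Int) (s : Int) (out : List (List Int)) : Decidable (Spec_perms_prefix n s out) := by unfold Spec_perms_prefix; infer_instance

-- ===== CLAIM (what is proved, stated in full; the proofs are below) =====
def Claim_equal_perms_prefix : Prop := ∀ (n : Int) (s : Int), Dom_perms_prefix n s → Pre_perms_prefix n s → Spec_perms_prefix n s (perms_prefix n s)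

-- ===== LEMMAS AND PROOFS =====

-- goB's backtracking accumulator expands to out ++ (permutations of remaining, prefixed).
theorem goB_eq (fuel : Nat) :
    ∀ (remaining : List Int), remaining.length < fuel →
    ∀ (f2 : Nat), remaining.length ≤ f2 →
    ∀ (pre : List Int) (out : List (List Int)),
      goB fuel pre remaining out
        = out ++ (pyPermutationsAux f2 remaining).map (fun p => pre ++ p) := by
  induction fuel with
  | zero =>
    intro remaining h
    exact absurd h (Nat.not_lt_zero _)
  | succ fuel ih =>
    intro remaining h f2 h2 pre out
    by_cases hrem : remaining = []
    · subst hrem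
      cases f2 <;> simp [goB, pyPermutationsAux]
    · have hlen : 0 < remaining.length := List.length_pos_iff.mpr hrem
      obtain ⟨g, rfl⟩ : ∃ g, f2 = g + 1 := ⟨f2 - 1, by omega⟩
      rw [goB, pyPermutationsAux]
      simp only [hrem, if_false]
      rw [PySem.List.pyRange_zero_nat, List.foldl_map]
      rw [PySem.List.foldl_congr_mem (List.range remaining.length) _
        (fun acc i => acc ++ ((pyPermutationsAux g (remaining.eraseIdx i)).map
              (fun p => remaining.getD i 0 :: p)).map (fun p => pre ++ p)) out ?_]
      · rw [PySem.List.foldl_append_eq_flatMap, List.map_flatMap]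
      · intro acc i hi
        have hi' : i < remaining.length := List.mem_range.mp hi
        have h1 : PySem.List.slice remaining none (some ((i : Nat) : Int)) = remaining.take i :=
          PySem.List.slice_to_natCast remaining i
        have hcast : ((i : Nat) : Int) + 1 = ((i + 1 : Nat) : Int) := by omega
        have h2' : PySem.List.slice remaining (some ((i + 1 : Nat) : Int)) none = remaining.drop (i + 1) :=
          PySem.List.slice_from_natCast remaining (i + 1)
        have hslice : PySem.List.slice remaining none (some ((i : Nat) : Int)) ++
            PySem.List.slice remaining (some (((i : Nat) : Int) + 1)) none
            = remaining.eraseIdx i := by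
          rw [h1, hcast, h2', List.eraseIdx_eq_take_drop_succ]
        have hget : PySem.List.pyGetD remaining ((i : Nat) : Int) 0 = remaining.getD i 0 := by
          simp [PySem.List.pyGetD_natCast]
        have hlee : (remaining.eraseIdx i).length + 1 = remaining.length := by
          have := List.length_eraseIdx (l := remaining) (i := i)
          simp only [hi', if_true] at this
          omega
        rw [hslice, hget, ih (remaining.eraseIdx i) (by omega) g (by omega)]
        simp [List.map_map, Function.comp_def, List.append_assoc]

-- p.insert(0, s) is s :: p
theorem insert_zero (p : List Int) (s : Int) : PySem.List.insert p 0 s = s :: p := by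
  simp [PySem.List.insert, PySem.List.sliceIndices]

-- ===== VERDICT (by name: the statement is the Claim_ definition above) =====
theorem perms_prefix_spec : Claim_equal_perms_prefix := by
  intro n s _ hpre
  unfold Spec_perms_prefix perms_prefix perms_prefix_alt
  have hmem : s ∈ PySem.List.pyRange 0 n 1 :=
    (PySem.List.mem_pyRange_one).mpr ⟨hpre.1, hpre.2⟩
  have hr : PySem.List.remove? (PySem.List.pyRange 0 n 1) s
      = some ((PySem.List.pyRange 0 n 1).erase s) :=
    PySem.List.remove?_eq_some_erase _ _ hmem
  simp only [hr]
  rw [PySem.List.foldl_append_singleton_eq_map]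
  rw [goB_eq _ _ (Nat.lt_succ_self _) _ (le_refl _)]
  simp [pyPermutations, insert_zero]
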